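-- pv_equiv track=rewrite | github.com/b1ck0/python_coding_problems | Sequences/020_number_of_palindromes.py | number_of_palindromes
-- ===== SOURCE A (Python) =====
-- def is_palindrome(sequence, min_length=2):
--     n = len(sequence)
--
--     if n < min_length:
--         return False
--
--     midpoint = n // 2
--
--     for i in range(midpoint):
--         if sequence[i] != sequence[n - 1 - i]:
--             return False
--
--     return True
--
-- def number_of_palindromes(string):
--     """
--     abba, aba, level are palindromes
--     :param string:
--     :return: number of palindromes in the string
--     :assuming:
--         - palindromes do not overlap
--         - minimum length of a palindrome is 3
--     """
--     n = len(string)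
--     palindromes = dict()  # (middle: start, end)
--
--     for i in range(1, n - 1):
--         start = end = i
--         while start >= 0 and end <= n:
--             if is_palindrome(string[start:end]):
--                 palindromes[i] = string[start:end]
--             if i - start == end - i:
--                 end += 1
--             elif i - start < end - i:
--                 start -= 1
--             else:
--                 end += 1
--
--     return len(palindromes), palindromes
-- ===== SOURCE B (Python) =====
-- def number_of_palindromes(string):
--     # Expand-around-center: grow the maximal odd and even palindromic windows
--     # at each center directly, instead of re-checking every window from scratch.
--     n = len(string)
--     palindromes = {}
--     for i in range(1, n - 1):
--         odd = 0
--         odd_lim = min(i, n - i - 1)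
--         while odd < odd_lim and string[i - odd - 1] == string[i + odd + 1]:
--             odd += 1
--         even = 0
--         even_lim = min(i, n - i)
--         while even < even_lim and string[i - even - 1] == string[i + even]:
--             even += 1
--         if even >= 1 and 2 * even > 2 * odd + 1:
--             palindromes[i] = string[i - even:i + even]
--         elif odd >= 1:
--             palindromes[i] = string[i - odd:i + odd + 1]
--     return len(palindromes), palindromes
-- ===== Notes on version B (the rewrite author's own statement) =====
-- stated objective: faster
-- what changed: A scans every window around each center, re-checking each slice with a full palindrome pass; B grows the maximal odd and even palindromic windows per center by expand-around-center character comparisons and picks the longer, so no window is ever re-scanned.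
import Mathlib
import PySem

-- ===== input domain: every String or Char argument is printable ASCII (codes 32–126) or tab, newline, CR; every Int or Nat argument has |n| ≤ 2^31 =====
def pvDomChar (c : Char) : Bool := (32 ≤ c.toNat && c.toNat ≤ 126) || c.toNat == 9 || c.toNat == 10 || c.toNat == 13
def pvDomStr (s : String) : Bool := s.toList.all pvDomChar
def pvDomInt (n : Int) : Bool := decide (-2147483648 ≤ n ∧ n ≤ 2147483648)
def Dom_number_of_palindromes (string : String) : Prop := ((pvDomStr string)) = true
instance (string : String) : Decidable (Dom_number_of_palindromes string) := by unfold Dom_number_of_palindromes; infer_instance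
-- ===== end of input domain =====

-- B replaces A's per-center scan of every window (each re-checked by a full palindrome
-- pass) with the classic expand-around-center growth of the maximal odd/even windows.

-- ===== PORT A =====
def is_palindrome (sequence : String) (min_length : Int) : Bool :=
  let n : Int := PySem.Str.len sequence
  if n < min_length then false
  else
    (PySem.List.pyRange 0 (PySem.Int.floordiv n 2) 1).all
      (fun i => PySem.Str.pyGet? sequence i == PySem.Str.pyGet? sequence (n - 1 - i))

def aWhile (string : String) (n i : Int) (start : Int) (end_ : Int)
    (d : PySem.Dict Int String) : PySem.Dict Int String :=
  if h : 0 ≤ start ∧ end_ ≤ n then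
    let sl := PySem.Str.slice string (some start) (some end_)
    let d' := if is_palindrome sl 2 then d.insert i sl else d
    if i - start = end_ - i then aWhile string n i start (end_ + 1) d'
    else if i - start < end_ - i then aWhile string n i (start - 1) end_ d'
    else aWhile string n i start (end_ + 1) d'
  else d
termination_by ((n + 2) - (end_ - start)).toNat
decreasing_by all_goals omega

def number_of_palindromes (string : String) : Int × (List (Int × String)) :=
  let n : Int := PySem.Str.len string
  let palindromes :=
    (PySem.List.pyRange 1 (n - 1) 1).foldl
      (fun d i => aWhile string n i i i d) PySem.Dict.empty
  ((palindromes.size : Int), palindromes.items)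

-- ===== PORT B =====
def expandOdd (string : String) (i lim : Int) (odd : Int) : Int :=
  if h : odd < lim ∧
      PySem.Str.pyGet? string (i - odd - 1) = PySem.Str.pyGet? string (i + odd + 1) then
    expandOdd string i lim (odd + 1)
  else odd
termination_by (lim - odd).toNat
decreasing_by omega

def expandEven (string : String) (i lim : Int) (even : Int) : Int :=
  if h : even < lim ∧
      PySem.Str.pyGet? string (i - even - 1) = PySem.Str.pyGet? string (i + even) then
    expandEven string i lim (even + 1)
  else even
termination_by (lim - even).toNat
decreasing_by omega

def number_of_palindromes_alt (string : String) : Int × (List (Int × String)) :=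
  let n : Int := PySem.Str.len string
  let palindromes :=
    (PySem.List.pyRange 1 (n - 1) 1).foldl
      (fun d i =>
        let odd := expandOdd string i (min i (n - i - 1)) 0
        let even := expandEven string i (min i (n - i)) 0
        if 1 ≤ even ∧ 2 * odd + 1 < 2 * even then
          d.insert i (PySem.Str.slice string (some (i - even)) (some (i + even)))
        else if 1 ≤ odd then
          d.insert i (PySem.Str.slice string (some (i - odd)) (some (i + odd + 1)))
        else d)
      PySem.Dict.empty
  ((palindromes.size : Int), palindromes.items)

-- ===== PRECONDITION & SPEC =====
def Spec_number_of_palindromes (string : String) (out : Int × (List (Int × String))) : Prop := out = number_of_palindromes_alt string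
instance (string : String) (out : Int × (List (Int × String))) : Decidable (Spec_number_of_palindromes string out) := by unfold Spec_number_of_palindromes; infer_instance

-- ===== CLAIM (what is proved, stated in full; the proofs are below) =====
def Claim_equal_number_of_palindromes : Prop := ∀ (string : String), Dom_number_of_palindromes string → Spec_number_of_palindromes string (number_of_palindromes string)

-- ===== LEMMAS AND PROOFS =====

-- the window string[s:e] as a list of chars
def pvWin (cs : List Char) (s e : Nat) : List Char := (cs.drop s).take (e - s)

-- "the odd window of radius k around centre i is symmetric"
def pvMatchO (cs : List Char) (i k : Nat) : Prop :=
  ∀ j, 1 ≤ j → j ≤ k → cs[i - j]? = cs[i + j]?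

-- "the even window of radius k spanning i-1..i is symmetric"
def pvMatchE (cs : List Char) (i k : Nat) : Prop :=
  ∀ j, 1 ≤ j → j ≤ k → cs[i - j]? = cs[i + j - 1]?

-- proof-side mirror of aWhile's phase structure: phase false = window (i-k, i+k),
-- phase true = window (i-k, i+k+1)
def pvChain (s : String) (i k : Nat) (phase : Bool) (d : PySem.Dict Int String) :
    PySem.Dict Int String :=
  match phase with
  | true =>
    if k ≤ min i (s.toList.length - 1 - i) then
      let sl := PySem.Str.slice s (some ((i : Int) - k)) (some ((i : Int) + k + 1))
      pvChain s i (k + 1) false (if is_palindrome sl 2 then d.insert (i : Int) sl else d)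
    else d
  | false =>
    if k ≤ min i (s.toList.length - i) then
      let sl := PySem.Str.slice s (some ((i : Int) - k)) (some ((i : Int) + k))
      pvChain s i k true (if is_palindrome sl 2 then d.insert (i : Int) sl else d)
    else d
termination_by (2 * (min i (s.toList.length - i) + 2) - (2 * k + (if phase then 1 else 0)))
decreasing_by all_goals (simp only [if_true, if_false]; omega)

lemma pv_half_iff (cs : List Char) :
    (∀ j, j < cs.length / 2 → cs[j]? = cs[cs.length - 1 - j]?) ↔ cs.reverse = cs := by
  constructor
  · intro h
    apply List.ext_getElem?
    intro i
    by_cases hi : i < cs.length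
    · rw [List.getElem?_reverse hi]
      by_cases h1 : i < cs.length / 2
      · exact (h i h1).symm
      · by_cases h2 : cs.length - 1 - i < cs.length / 2
        · have := h _ h2
          rw [show cs.length - 1 - (cs.length - 1 - i) = i by omega] at this
          exact this
        · rw [show cs.length - 1 - i = i by omega]
    · rw [List.getElem?_eq_none (by simpa using hi), List.getElem?_eq_none (by omega)]
  · intro h j hj
    conv_lhs => rw [← h]
    rw [List.getElem?_reverse (by omega)]


lemma pv_ispal_iff (t : String) :
    is_palindrome t 2 = true ↔ 2 ≤ t.toList.length ∧ t.toList.reverse = t.toList := by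
  rw [is_palindrome]
  simp only [PySem.Str.len_eq]
  by_cases hL : t.toList.length < 2
  · rw [if_pos (by exact_mod_cast hL)]
    simp only [Bool.false_eq_true, false_iff, not_and]
    intro h2; omega
  · rw [if_neg (by exact_mod_cast hL)]
    rw [show ((2:Int)) = ((2:Nat):Int) by norm_num, PySem.Int.floordiv_natCast,
      PySem.List.pyRange_one]
    rw [List.all_map, List.all_eq_true]
    simp only [Function.comp, zero_add, List.mem_range, beq_iff_eq, sub_zero, Int.toNat_natCast]
    rw [← pv_half_iff]
    have key : ∀ j : Nat, j < t.toList.length / 2 →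
        ((PySem.Str.pyGet? t (j:Int) = PySem.Str.pyGet? t ((t.toList.length:Int) - 1 - (j:Int))) ↔
          (t.toList[j]? = t.toList[t.toList.length - 1 - j]?)) := by
      intro j hj
      rw [show ((t.toList.length:Int) - 1 - (j:Int)) = ((t.toList.length - 1 - j : Nat) : Int) by omega,
        PySem.Str.pyGet?_natCast, PySem.Str.pyGet?_natCast]
    constructor
    · intro h
      exact ⟨by omega, fun j hj => (key j hj).mp (h j hj)⟩
    · intro h j hj
      exact (key j hj).mpr (h.2 j hj)


lemma pv_ispal_short (t : String) (h : t.toList.length < 2) : is_palindrome t 2 = false := by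
  cases h2 : is_palindrome t 2 with
  | false => rfl
  | true => exact absurd ((pv_ispal_iff t).mp h2).1 (by omega)


lemma pv_pal_cons_append (a b : Char) (l : List Char) :
    ((a :: (l ++ [b])).reverse = a :: (l ++ [b])) ↔ (a = b ∧ l.reverse = l) := by
  have h1 : (a :: (l ++ [b])).reverse = b :: (l.reverse ++ [a]) := by simp
  rw [h1, List.cons_eq_cons]
  constructor
  · rintro ⟨h2, h3⟩
    subst h2
    refine ⟨rfl, ?_⟩
    exact List.append_cancel_right h3
  · rintro ⟨h2, h3⟩
    subst h2
    rw [h3]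
    exact ⟨rfl, rfl⟩


lemma pv_win_decomp (cs : List Char) (s e : Nat) (h2 : s + 2 ≤ e) (he : e ≤ cs.length) :
    pvWin cs s e = cs.getD s 'x' :: (pvWin cs (s + 1) (e - 1) ++ [cs.getD (e - 1) 'x']) := by
  unfold pvWin
  rw [List.getD_eq_getElem cs 'x' (n := s) (by omega),
      List.getD_eq_getElem cs 'x' (n := e - 1) (by omega)]
  rw [← List.getElem_cons_drop (as := cs) (i := s) (by omega),
      show e - s = (e - s - 1) + 1 by omega, List.take_succ_cons]
  congr 1
  rw [show e - s - 1 = (e - 1 - (s + 1)) + 1 by omega, List.take_add_one]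
  congr 1
  rw [List.getElem?_drop, show s + 1 + (e - 1 - (s + 1)) = e - 1 by omega,
      List.getElem?_eq_getElem (by omega)]
  rfl


lemma pv_win_pal_gen (cs : List Char) (c i : Nat) (hc : c ≤ 1) :
    ∀ m, m ≤ i → i + m + c ≤ cs.length →
    (((pvWin cs (i - m) (i + m + c)).reverse = pvWin cs (i - m) (i + m + c)) ↔
      ∀ j, 1 ≤ j → j ≤ m → cs[i - j]? = cs[i + j + c - 1]?) := by
  intro m
  induction m with
  | zero =>
    intro _ hb
    simp only [Nat.sub_zero, Nat.add_zero]
    constructor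
    · intro _ j hj1 hj0; omega
    · intro _
      interval_cases c
      · simp [pvWin]
      · have hw : pvWin cs i (i + 1) = [cs.getD i 'x'] := by
          unfold pvWin
          rw [List.getD_eq_getElem cs 'x' (n := i) (by omega),
            show i + 1 - i = 1 by omega,
            ← List.getElem_cons_drop (as := cs) (i := i) (by omega)]
          rfl
        rw [hw]; simp
  | succ m ih =>
    intro hm hb
    rw [pv_win_decomp cs (i - (m+1)) (i + (m+1) + c) (by omega) (by omega)]
    rw [show i - (m+1) + 1 = i - m by omega, show i + (m+1) + c - 1 = i + m + c by omega]
    rw [pv_pal_cons_append]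
    rw [ih (by omega) (by omega)]
    have hpair : (cs.getD (i - (m+1)) 'x' = cs.getD (i + m + c) 'x') ↔
        (cs[i - (m+1)]? = cs[i + (m+1) + c - 1]?) := by
      rw [show i + (m+1) + c - 1 = i + m + c by omega]
      rw [List.getD_eq_getElem cs 'x' (n := i - (m+1)) (by omega),
          List.getD_eq_getElem cs 'x' (n := i + m + c) (by omega),
          List.getElem?_eq_getElem (by omega), List.getElem?_eq_getElem (by omega)]
      simp
    constructor
    · rintro ⟨hp, hrest⟩ j hj1 hj2
      rcases Nat.lt_or_ge j (m+1) with hj | hj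
      · exact hrest j hj1 (by omega)
      · have hjeq : j = m + 1 := by omega
        subst hjeq
        exact hpair.mp hp
    · intro h
      exact ⟨hpair.mpr (h (m+1) (by omega) (le_refl _)),
        fun j hj1 hj2 => h j hj1 (by omega)⟩


lemma pv_palO_iff (cs : List Char) (i m : Nat) (hm1 : m ≤ i) (hm2 : i + m + 1 ≤ cs.length) :
    ((pvWin cs (i - m) (i + m + 1)).reverse = pvWin cs (i - m) (i + m + 1)) ↔ pvMatchO cs i m := by
  have h := pv_win_pal_gen cs 1 i (by omega) m hm1 hm2
  unfold pvMatchO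
  simp only [Nat.add_sub_cancel] at h
  exact h


lemma pv_palE_iff (cs : List Char) (i m : Nat) (hm1 : m ≤ i) (hm2 : i + m ≤ cs.length) :
    ((pvWin cs (i - m) (i + m)).reverse = pvWin cs (i - m) (i + m)) ↔ pvMatchE cs i m := by
  have h := pv_win_pal_gen cs 0 i (by omega) m hm1 (by omega)
  unfold pvMatchE
  simp only [Nat.add_zero] at h
  exact h


lemma pv_win_len (cs : List Char) (s e : Nat) (he : e ≤ cs.length) :
    (pvWin cs s e).length = e - s := by
  simp [pvWin]; omega


lemma pv_ispal_slice (s : String) (a b : Nat) (hab : a ≤ b) (hb : b ≤ s.toList.length) :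
    is_palindrome (PySem.Str.slice s (some (a : Int)) (some (b : Int))) 2 = true ↔
      2 ≤ b - a ∧ (pvWin s.toList a b).reverse = pvWin s.toList a b := by
  rw [pv_ispal_iff]
  have hsl : (PySem.Str.slice s (some (a : Int)) (some (b : Int))).toList = pvWin s.toList a b := by
    rw [PySem.Str.toList_slice, PySem.Chars.slice_eq_listSlice, PySem.List.slice_natCast]
    rfl
  rw [hsl, pv_win_len _ _ _ hb]


lemma pv_expandOdd_spec (s : String) (iN limN : Nat) (hlim : limN ≤ iN) :
    ∀ fuel kN, limN - kN = fuel → kN ≤ limN → pvMatchO s.toList iN kN →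
    ∃ r : Nat, expandOdd s (iN : Int) (limN : Int) (kN : Int) = (r : Int) ∧
      kN ≤ r ∧ r ≤ limN ∧ pvMatchO s.toList iN r ∧
      (r < limN → s.toList[iN - (r + 1)]? ≠ s.toList[iN + (r + 1)]?) := by
  intro fuel
  induction fuel with
  | zero =>
    intro kN hf hk hm
    rw [expandOdd, dif_neg (by push_neg; intro h; exfalso; omega)]
    exact ⟨kN, rfl, le_refl _, hk, hm, by omega⟩
  | succ fuel ih =>
    intro kN hf hk hm
    have hiff : ((kN : Int) < (limN : Int) ∧
        PySem.Str.pyGet? s ((iN : Int) - (kN : Int) - 1) = PySem.Str.pyGet? s ((iN : Int) + (kN : Int) + 1)) ↔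
        (kN < limN ∧ s.toList[iN - (kN + 1)]? = s.toList[iN + (kN + 1)]?) := by
      have hlt : kN < limN := by omega
      have e1 : (iN : Int) - (kN : Int) - 1 = ((iN - (kN + 1) : Nat) : Int) := by omega
      have e2 : (iN : Int) + (kN : Int) + 1 = ((iN + (kN + 1) : Nat) : Int) := by push_cast; ring
      rw [e1, e2, PySem.Str.pyGet?_natCast, PySem.Str.pyGet?_natCast]
      simp [hlt]
    rw [expandOdd]
    by_cases hc : kN < limN ∧ s.toList[iN - (kN + 1)]? = s.toList[iN + (kN + 1)]?
    · rw [dif_pos (hiff.mpr hc)]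
      have hm' : pvMatchO s.toList iN (kN + 1) := by
        intro j hj1 hj2
        rcases Nat.lt_or_ge j (kN + 1) with hj | hj
        · exact hm j hj1 (by omega)
        · have : j = kN + 1 := by omega
          subst this
          exact hc.2
      have := ih (kN + 1) (by omega) (by omega) hm'
      rw [show ((kN + 1 : Nat) : Int) = ((kN : Int) + 1) by push_cast; ring] at this
      obtain ⟨r, h1, h2, h3, h4, h5⟩ := this
      exact ⟨r, h1, by omega, h3, h4, h5⟩
    · rw [dif_neg (fun h => hc (hiff.mp h))]
      refine ⟨kN, rfl, le_refl _, hk, hm, fun hlt => ?_⟩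
      intro heq
      exact hc ⟨hlt, heq⟩

lemma pv_expandEven_spec (s : String) (iN limN : Nat) (hlim : limN ≤ iN) :
    ∀ fuel kN, limN - kN = fuel → kN ≤ limN → pvMatchE s.toList iN kN →
    ∃ r : Nat, expandEven s (iN : Int) (limN : Int) (kN : Int) = (r : Int) ∧
      kN ≤ r ∧ r ≤ limN ∧ pvMatchE s.toList iN r ∧
      (r < limN → s.toList[iN - (r + 1)]? ≠ s.toList[iN + r]?) := by
  intro fuel
  induction fuel with
  | zero =>
    intro kN hf hk hm
    rw [expandEven, dif_neg (by push_neg; intro h; exfalso; omega)]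
    exact ⟨kN, rfl, le_refl _, hk, hm, by omega⟩
  | succ fuel ih =>
    intro kN hf hk hm
    have hiff : ((kN : Int) < (limN : Int) ∧
        PySem.Str.pyGet? s ((iN : Int) - (kN : Int) - 1) = PySem.Str.pyGet? s ((iN : Int) + (kN : Int))) ↔
        (kN < limN ∧ s.toList[iN - (kN + 1)]? = s.toList[iN + kN]?) := by
      have hlt : kN < limN := by omega
      have e1 : (iN : Int) - (kN : Int) - 1 = ((iN - (kN + 1) : Nat) : Int) := by omega
      have e2 : (iN : Int) + (kN : Int) = ((iN + kN : Nat) : Int) := by push_cast; ring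
      rw [e1, e2, PySem.Str.pyGet?_natCast, PySem.Str.pyGet?_natCast]
      simp [hlt]
    rw [expandEven]
    by_cases hc : kN < limN ∧ s.toList[iN - (kN + 1)]? = s.toList[iN + kN]?
    · rw [dif_pos (hiff.mpr hc)]
      have hm' : pvMatchE s.toList iN (kN + 1) := by
        intro j hj1 hj2
        rcases Nat.lt_or_ge j (kN + 1) with hj | hj
        · exact hm j hj1 (by omega)
        · have hje : j = kN + 1 := by omega
          subst hje
          rw [show iN + (kN + 1) - 1 = iN + kN by omega]
          exact hc.2
      have hrec := ih (kN + 1) (by omega) (by omega) hm'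
      rw [show ((kN + 1 : Nat) : Int) = ((kN : Int) + 1) by push_cast; ring] at hrec
      obtain ⟨r, h1, h2, h3, h4, h5⟩ := hrec
      exact ⟨r, h1, by omega, h3, h4, h5⟩
    · rw [dif_neg (fun h => hc (hiff.mp h))]
      refine ⟨kN, rfl, le_refl _, hk, hm, fun hlt heq => hc ⟨hlt, heq⟩⟩

lemma pv_slice_toList (s : String) (a b : Nat) :
    (PySem.Str.slice s (some (a : Int)) (some (b : Int))).toList = pvWin s.toList a b := by
  rw [PySem.Str.toList_slice, PySem.Chars.slice_eq_listSlice, PySem.List.slice_natCast]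
  rfl

lemma pv_win_len_le (cs : List Char) (s e : Nat) : (pvWin cs s e).length ≤ e - s := by
  simp [pvWin]

lemma pvChain_false_eq (s : String) (iN k : Nat) (d : PySem.Dict Int String) :
    pvChain s iN k false d =
      if k ≤ min iN (s.toList.length - iN) then
        pvChain s iN k true
          (if is_palindrome (PySem.Str.slice s (some ((iN : Int) - k)) (some ((iN : Int) + k))) 2 then
            d.insert (iN : Int) (PySem.Str.slice s (some ((iN : Int) - k)) (some ((iN : Int) + k)))
          else d)
      else d := by
  conv_lhs => rw [pvChain]

lemma pvChain_true_eq (s : String) (iN k : Nat) (d : PySem.Dict Int String) :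
    pvChain s iN k true d =
      if k ≤ min iN (s.toList.length - 1 - iN) then
        pvChain s iN (k + 1) false
          (if is_palindrome (PySem.Str.slice s (some ((iN : Int) - k)) (some ((iN : Int) + k + 1))) 2 then
            d.insert (iN : Int) (PySem.Str.slice s (some ((iN : Int) - k)) (some ((iN : Int) + k + 1)))
          else d)
      else d := by
  conv_lhs => rw [pvChain]

lemma aWhile_eq (string : String) (n i start end_ : Int) (d : PySem.Dict Int String) :
    aWhile string n i start end_ d =
      if 0 ≤ start ∧ end_ ≤ n then
        (if i - start = end_ - i then
          aWhile string n i start (end_ + 1)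
            (if is_palindrome (PySem.Str.slice string (some start) (some end_)) 2 then
              d.insert i (PySem.Str.slice string (some start) (some end_)) else d)
        else if i - start < end_ - i then
          aWhile string n i (start - 1) end_
            (if is_palindrome (PySem.Str.slice string (some start) (some end_)) 2 then
              d.insert i (PySem.Str.slice string (some start) (some end_)) else d)
        else aWhile string n i start (end_ + 1)
            (if is_palindrome (PySem.Str.slice string (some start) (some end_)) 2 then
              d.insert i (PySem.Str.slice string (some start) (some end_)) else d))
      else d := by
  conv_lhs => rw [aWhile]
  rfl

lemma pvChain_spec (s : String) (iN rE rO : Nat)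
    (hrE : rE ≤ min iN (s.toList.length - iN)) (hrO : rO ≤ min iN (s.toList.length - 1 - iN))
    (hE : ∀ m, 1 ≤ m → m ≤ min iN (s.toList.length - iN) →
      (is_palindrome (PySem.Str.slice s (some ((iN : Int) - m)) (some ((iN : Int) + m))) 2 = true
        ↔ m ≤ rE))
    (hO : ∀ m, 1 ≤ m → m ≤ min iN (s.toList.length - 1 - iN) →
      (is_palindrome (PySem.Str.slice s (some ((iN : Int) - m)) (some ((iN : Int) + m + 1))) 2 = true
        ↔ m ≤ rO)) :
    ∀ k d,
      (pvChain s iN k false d =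
        (if 1 ≤ rE ∧ k ≤ rE ∧ 2 * rO + 1 < 2 * rE then
          d.insert (iN : Int) (PySem.Str.slice s (some ((iN : Int) - rE)) (some ((iN : Int) + rE)))
        else if 1 ≤ rO ∧ k ≤ rO then
          d.insert (iN : Int) (PySem.Str.slice s (some ((iN : Int) - rO)) (some ((iN : Int) + rO + 1)))
        else d)) ∧
      (pvChain s iN k true d =
        (if 1 ≤ rE ∧ k + 1 ≤ rE ∧ 2 * rO + 1 < 2 * rE then
          d.insert (iN : Int) (PySem.Str.slice s (some ((iN : Int) - rE)) (some ((iN : Int) + rE)))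
        else if 1 ≤ rO ∧ k ≤ rO then
          d.insert (iN : Int) (PySem.Str.slice s (some ((iN : Int) - rO)) (some ((iN : Int) + rO + 1)))
        else d)) := by
  suffices H : ∀ n k, min iN (s.toList.length - iN) + 2 - k ≤ n →
      (∀ d, pvChain s iN k false d =
        (if 1 ≤ rE ∧ k ≤ rE ∧ 2 * rO + 1 < 2 * rE then
          d.insert (iN : Int) (PySem.Str.slice s (some ((iN : Int) - rE)) (some ((iN : Int) + rE)))
        else if 1 ≤ rO ∧ k ≤ rO then
          d.insert (iN : Int) (PySem.Str.slice s (some ((iN : Int) - rO)) (some ((iN : Int) + rO + 1)))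
        else d)) ∧
      (∀ d, pvChain s iN k true d =
        (if 1 ≤ rE ∧ k + 1 ≤ rE ∧ 2 * rO + 1 < 2 * rE then
          d.insert (iN : Int) (PySem.Str.slice s (some ((iN : Int) - rE)) (some ((iN : Int) + rE)))
        else if 1 ≤ rO ∧ k ≤ rO then
          d.insert (iN : Int) (PySem.Str.slice s (some ((iN : Int) - rO)) (some ((iN : Int) + rO + 1)))
        else d)) by
    intro k d
    exact ⟨(H (min iN (s.toList.length - iN) + 2) k (by omega)).1 d,
           (H (min iN (s.toList.length - iN) + 2) k (by omega)).2 d⟩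
  intro n
  induction n with
  | zero =>
    intro k hk
    constructor
    · intro d
      rw [pvChain_false_eq, if_neg (by omega), if_neg (by omega), if_neg (by omega)]
    · intro d
      rw [pvChain_true_eq, if_neg (by omega), if_neg (by omega), if_neg (by omega)]
  | succ n ih =>
    intro k hk
    have hTrue : ∀ d, pvChain s iN k true d =
        (if 1 ≤ rE ∧ k + 1 ≤ rE ∧ 2 * rO + 1 < 2 * rE then
          d.insert (iN : Int) (PySem.Str.slice s (some ((iN : Int) - rE)) (some ((iN : Int) + rE)))
        else if 1 ≤ rO ∧ k ≤ rO then
          d.insert (iN : Int) (PySem.Str.slice s (some ((iN : Int) - rO)) (some ((iN : Int) + rO + 1)))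
        else d) := by
      intro d
      by_cases hg : k ≤ min iN (s.toList.length - 1 - iN)
      · rw [pvChain_true_eq, if_pos hg, (ih (k + 1) (by omega)).1]
        by_cases hpal : is_palindrome
            (PySem.Str.slice s (some ((iN : Int) - k)) (some ((iN : Int) + k + 1))) 2 = true
        · have hk1 : 1 ≤ k := by
            rcases Nat.eq_zero_or_pos k with rfl | h1
            · exfalso
              rw [show ((iN : Int) - ((0 : Nat) : Int)) = ((iN : Nat) : Int) from by push_cast; ring,
                  show ((iN : Int) + ((0 : Nat) : Int) + 1) = ((iN + 1 : Nat) : Int) from by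
                    push_cast; ring] at hpal
              rw [pv_ispal_short _ (by
                rw [pv_slice_toList]
                have := pv_win_len_le s.toList iN (iN + 1)
                omega)] at hpal
              simp at hpal
            · exact h1
          have hko : k ≤ rO := (hO k hk1 hg).mp hpal
          rw [if_pos hpal]
          by_cases hC1 : 1 ≤ rE ∧ k + 1 ≤ rE ∧ 2 * rO + 1 < 2 * rE
          · rw [if_pos hC1, if_pos hC1, PySem.Dict.insert_insert_self]
          · rw [if_neg hC1, if_neg hC1]
            by_cases hC2 : 1 ≤ rO ∧ k + 1 ≤ rO
            · rw [if_pos hC2, if_pos (show 1 ≤ rO ∧ k ≤ rO by omega),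
                PySem.Dict.insert_insert_self]
            · rw [if_neg hC2, if_pos (show 1 ≤ rO ∧ k ≤ rO by omega)]
              obtain rfl : rO = k := by omega
              rfl
        · have hiffO : (1 ≤ rO ∧ k + 1 ≤ rO) ↔ (1 ≤ rO ∧ k ≤ rO) := by
            rcases Nat.eq_zero_or_pos k with rfl | hk1
            · omega
            · have : ¬ k ≤ rO := fun h => hpal ((hO k hk1 hg).mpr h)
              omega
          rw [if_neg hpal]
          by_cases hC1 : 1 ≤ rE ∧ k + 1 ≤ rE ∧ 2 * rO + 1 < 2 * rE
          · rw [if_pos hC1, if_pos hC1]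
          · rw [if_neg hC1, if_neg hC1]
            by_cases hC2 : 1 ≤ rO ∧ k ≤ rO
            · rw [if_pos (hiffO.mpr hC2), if_pos hC2]
            · rw [if_neg (fun h => hC2 (hiffO.mp h)), if_neg hC2]
      · rw [pvChain_true_eq, if_neg hg, if_neg (by omega), if_neg (by omega)]
    refine ⟨?_, hTrue⟩
    intro d
    by_cases hg : k ≤ min iN (s.toList.length - iN)
    · rw [pvChain_false_eq, if_pos hg, hTrue]
      by_cases hpal : is_palindrome
          (PySem.Str.slice s (some ((iN : Int) - k)) (some ((iN : Int) + k))) 2 = true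
      · have hk1 : 1 ≤ k := by
          rcases Nat.eq_zero_or_pos k with rfl | h1
          · exfalso
            rw [show ((iN : Int) - ((0 : Nat) : Int)) = ((iN : Nat) : Int) from by push_cast; ring,
                show ((iN : Int) + ((0 : Nat) : Int)) = ((iN : Nat) : Int) from by
                  push_cast; ring] at hpal
            rw [pv_ispal_short _ (by
              rw [pv_slice_toList]
              have := pv_win_len_le s.toList iN iN
              omega)] at hpal
            simp at hpal
          · exact h1
        have hke : k ≤ rE := (hE k hk1 hg).mp hpal
        rw [if_pos hpal]
        by_cases hC1 : 1 ≤ rE ∧ k + 1 ≤ rE ∧ 2 * rO + 1 < 2 * rE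
        · rw [if_pos hC1, if_pos (show 1 ≤ rE ∧ k ≤ rE ∧ 2 * rO + 1 < 2 * rE by omega),
            PySem.Dict.insert_insert_self]
        · rw [if_neg hC1]
          by_cases hC2 : 1 ≤ rO ∧ k ≤ rO
          · rw [if_pos hC2, if_neg (show ¬ (1 ≤ rE ∧ k ≤ rE ∧ 2 * rO + 1 < 2 * rE) by omega),
              if_pos hC2, PySem.Dict.insert_insert_self]
          · rw [if_neg hC2]
            obtain rfl : rE = k := by omega
            rw [if_pos (show 1 ≤ rE ∧ rE ≤ rE ∧ 2 * rO + 1 < 2 * rE by omega)]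
      · have hiffE : (1 ≤ rE ∧ k + 1 ≤ rE ∧ 2 * rO + 1 < 2 * rE) ↔
            (1 ≤ rE ∧ k ≤ rE ∧ 2 * rO + 1 < 2 * rE) := by
          rcases Nat.eq_zero_or_pos k with rfl | hk1
          · omega
          · have : ¬ k ≤ rE := fun h => hpal ((hE k hk1 hg).mpr h)
            omega
        rw [if_neg hpal]
        by_cases hC1 : 1 ≤ rE ∧ k ≤ rE ∧ 2 * rO + 1 < 2 * rE
        · rw [if_pos (hiffE.mpr hC1), if_pos hC1]
        · rw [if_neg (fun h => hC1 (hiffE.mp h)), if_neg hC1]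
    · rw [pvChain_false_eq, if_neg hg, if_neg (by omega), if_neg (by omega)]

lemma pv_aWhile_eq_chain (s : String) (iN : Nat) (hi2 : iN + 1 < s.toList.length) :
    ∀ d, aWhile s (s.toList.length : Int) (iN : Int) (iN : Int) (iN : Int) d =
      pvChain s iN 0 false d := by
  suffices H : ∀ n k, min iN (s.toList.length - iN) + 2 - k ≤ n →
      (∀ d, aWhile s (s.toList.length : Int) (iN : Int) ((iN : Int) - (k : Int))
          ((iN : Int) + (k : Int)) d = pvChain s iN k false d) ∧
      (∀ d, aWhile s (s.toList.length : Int) (iN : Int) ((iN : Int) - (k : Int))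
          ((iN : Int) + (k : Int) + 1) d = pvChain s iN k true d) by
    intro d
    have h := (H (min iN (s.toList.length - iN) + 2) 0 (by omega)).1 d
    rw [show ((iN : Int) - ((0 : Nat) : Int)) = (iN : Int) by push_cast; ring,
        show ((iN : Int) + ((0 : Nat) : Int)) = (iN : Int) by push_cast; ring] at h
    exact h
  intro n
  induction n with
  | zero =>
    intro k hk
    constructor
    · intro d
      rw [aWhile_eq, if_neg (by omega), pvChain_false_eq, if_neg (by omega)]
    · intro d
      rw [aWhile_eq, if_neg (by omega), pvChain_true_eq, if_neg (by omega)]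
  | succ n ih =>
    intro k hk
    have hTrue : ∀ d, aWhile s (s.toList.length : Int) (iN : Int) ((iN : Int) - (k : Int))
        ((iN : Int) + (k : Int) + 1) d = pvChain s iN k true d := by
      intro d
      by_cases hg : k ≤ min iN (s.toList.length - 1 - iN)
      · have h := (ih (k + 1) (by omega)).1
          (if is_palindrome (PySem.Str.slice s (some ((iN : Int) - (k : Int)))
              (some ((iN : Int) + (k : Int) + 1))) 2 then
            d.insert (iN : Int) (PySem.Str.slice s (some ((iN : Int) - (k : Int)))
              (some ((iN : Int) + (k : Int) + 1)))
          else d)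
        rw [show ((iN : Int) - ((k + 1 : Nat) : Int)) = ((iN : Int) - (k : Int) - 1) by
              push_cast; ring,
            show ((iN : Int) + ((k + 1 : Nat) : Int)) = ((iN : Int) + (k : Int) + 1) by
              push_cast; ring] at h
        rw [aWhile_eq, if_pos (by omega), if_neg (by omega), if_pos (by omega), h,
          pvChain_true_eq, if_pos hg]
      · rw [aWhile_eq, if_neg (by omega), pvChain_true_eq, if_neg hg]
    refine ⟨?_, hTrue⟩
    intro d
    by_cases hg : k ≤ min iN (s.toList.length - iN)
    · rw [aWhile_eq, if_pos (by omega), if_pos (by omega), hTrue, pvChain_false_eq, if_pos hg]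
    · rw [aWhile_eq, if_neg (by omega), pvChain_false_eq, if_neg hg]

lemma pv_step_eq (s : String) (iN : Nat) (hi1 : 1 ≤ iN) (hi2 : iN + 1 < s.toList.length)
    (d : PySem.Dict Int String) :
    aWhile s (s.toList.length : Int) (iN : Int) (iN : Int) (iN : Int) d =
      (let i : Int := (iN : Int)
       let n : Int := (s.toList.length : Int)
       let odd := expandOdd s i (min i (n - i - 1)) 0
       let even := expandEven s i (min i (n - i)) 0
       if 1 ≤ even ∧ 2 * odd + 1 < 2 * even then
         d.insert i (PySem.Str.slice s (some (i - even)) (some (i + even)))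
       else if 1 ≤ odd then
         d.insert i (PySem.Str.slice s (some (i - odd)) (some (i + odd + 1)))
       else d) := by
  have hKOint : min ((iN : Int)) ((s.toList.length : Int) - (iN : Int) - 1) =
      ((min iN (s.toList.length - 1 - iN) : Nat) : Int) := by omega
  have hKEint : min ((iN : Int)) ((s.toList.length : Int) - (iN : Int)) =
      ((min iN (s.toList.length - iN) : Nat) : Int) := by omega
  obtain ⟨rO, hOeq, -, hrO, hmO, hstO⟩ := pv_expandOdd_spec s iN
    (min iN (s.toList.length - 1 - iN)) (by omega) (min iN (s.toList.length - 1 - iN)) 0 rfl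
    (by omega) (fun j hj1 hj2 => absurd hj1 (by omega))
  obtain ⟨rE, hEeq, -, hrE, hmE, hstE⟩ := pv_expandEven_spec s iN
    (min iN (s.toList.length - iN)) (by omega) (min iN (s.toList.length - iN)) 0 rfl
    (by omega) (fun j hj1 hj2 => absurd hj1 (by omega))
  rw [Nat.cast_zero] at hOeq hEeq
  have hOiff : ∀ m, 1 ≤ m → m ≤ min iN (s.toList.length - 1 - iN) →
      (is_palindrome (PySem.Str.slice s (some ((iN : Int) - m)) (some ((iN : Int) + m + 1))) 2 = true
        ↔ m ≤ rO) := by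
    intro m h1 h2
    rw [show ((iN : Int) - m) = ((iN - m : Nat) : Int) by omega,
        show ((iN : Int) + m + 1) = ((iN + m + 1 : Nat) : Int) by push_cast; ring,
        pv_ispal_slice s (iN - m) (iN + m + 1) (by omega) (by omega),
        show iN + m + 1 - (iN - m) = 2 * m + 1 by omega,
        pv_palO_iff s.toList iN m (by omega) (by omega)]
    constructor
    · rintro ⟨-, hmm⟩
      by_contra hgt
      exact hstO (by omega) (hmm (rO + 1) (by omega) (by omega))
    · intro hle
      exact ⟨by omega, fun j hj1 hj2 => hmO j hj1 (by omega)⟩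
  have hEiff : ∀ m, 1 ≤ m → m ≤ min iN (s.toList.length - iN) →
      (is_palindrome (PySem.Str.slice s (some ((iN : Int) - m)) (some ((iN : Int) + m))) 2 = true
        ↔ m ≤ rE) := by
    intro m h1 h2
    rw [show ((iN : Int) - m) = ((iN - m : Nat) : Int) by omega,
        show ((iN : Int) + m) = ((iN + m : Nat) : Int) by push_cast; ring,
        pv_ispal_slice s (iN - m) (iN + m) (by omega) (by omega),
        show iN + m - (iN - m) = 2 * m by omega,
        pv_palE_iff s.toList iN m (by omega) (by omega)]
    constructor
    · rintro ⟨-, hmm⟩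
      by_contra hgt
      have hp := hmm (rE + 1) (by omega) (by omega)
      rw [show iN + (rE + 1) - 1 = iN + rE by omega] at hp
      exact hstE (by omega) hp
    · intro hle
      exact ⟨by omega, fun j hj1 hj2 => hmE j hj1 (by omega)⟩
  have hchain := (pvChain_spec s iN rE rO hrE hrO hEiff hOiff 0 d).1
  rw [pv_aWhile_eq_chain s iN hi2 d, hchain]
  dsimp only
  rw [hKOint, hKEint, hOeq, hEeq]
  by_cases c1 : 1 ≤ rE ∧ 2 * rO + 1 < 2 * rE
  · rw [if_pos (show 1 ≤ rE ∧ 0 ≤ rE ∧ 2 * rO + 1 < 2 * rE by omega),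
        if_pos (show (1 : Int) ≤ (rE : Int) ∧ 2 * (rO : Int) + 1 < 2 * (rE : Int) by
          constructor <;> [exact_mod_cast c1.1; exact_mod_cast c1.2])]
  · rw [if_neg (show ¬ (1 ≤ rE ∧ 0 ≤ rE ∧ 2 * rO + 1 < 2 * rE) by omega),
        if_neg (show ¬ ((1 : Int) ≤ (rE : Int) ∧ 2 * (rO : Int) + 1 < 2 * (rE : Int)) by
          intro h; exact c1 ⟨by exact_mod_cast h.1, by exact_mod_cast h.2⟩)]
    by_cases c2 : 1 ≤ rO
    · rw [if_pos (show 1 ≤ rO ∧ 0 ≤ rO by omega),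
        if_pos (show (1 : Int) ≤ (rO : Int) by exact_mod_cast c2)]
    · rw [if_neg (show ¬ (1 ≤ rO ∧ 0 ≤ rO) by omega),
        if_neg (show ¬ ((1 : Int) ≤ (rO : Int)) by intro h; exact c2 (by exact_mod_cast h))]

-- ===== VERDICT (by name: the statement is the Claim_ definition above) =====
theorem number_of_palindromes_spec : Claim_equal_number_of_palindromes := by
  intro s _
  unfold Spec_number_of_palindromes
  have hd : (PySem.List.pyRange 1 ((s.toList.length : Int) - 1) 1).foldl
      (fun d i => aWhile s (s.toList.length : Int) i i i d) PySem.Dict.empty =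
    (PySem.List.pyRange 1 ((s.toList.length : Int) - 1) 1).foldl
      (fun d i =>
        let odd := expandOdd s i (min i ((s.toList.length : Int) - i - 1)) 0
        let even := expandEven s i (min i ((s.toList.length : Int) - i)) 0
        if 1 ≤ even ∧ 2 * odd + 1 < 2 * even then
          d.insert i (PySem.Str.slice s (some (i - even)) (some (i + even)))
        else if 1 ≤ odd then
          d.insert i (PySem.Str.slice s (some (i - odd)) (some (i + odd + 1)))
        else d)
      PySem.Dict.empty := by
    apply PySem.List.foldl_congr_mem
    intro d i hi
    rw [PySem.List.mem_pyRange_one] at hi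
    have h0 : i = ((i.toNat : Nat) : Int) := by omega
    rw [h0]
    exact pv_step_eq s i.toNat (by omega) (by omega) d
  simp only [number_of_palindromes, number_of_palindromes_alt, PySem.Str.len_eq]
  rw [hd]
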